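-- pv_equiv track=rewrite | github.com/ess-dmsc/python-nexus-utilities | nexusbuilder.py | create_off_face_vertex_map
-- ===== SOURCE A (Python) =====
-- def create_off_face_vertex_map(off_faces):
--     """
--     Avoid having a ragged edge faces dataset due to differing numbers of vertices in faces by recording
--     a flattened faces dataset (vertex_indices) and putting the start index for each face in that
--     into the faces dataset.
--
--     :param off_faces: OFF-style faces array, each row is number of vertices followed by vertex indices
--     :return: flattened array (vertex_indices) and the start indices in that (faces)
--     """
--     faces = []
--     vertex_indices = []
--     current_index = 0
--     for face in off_faces:
--         faces.append(current_index)
--         current_index += face[0]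
--         for vertex_index in face[1:]:
--             vertex_indices.append(vertex_index)
--     return vertex_indices, faces
-- ===== SOURCE B (Python) =====
-- def create_off_face_vertex_map(off_faces):
--     vertex_indices = [v for face in off_faces for v in face[1:]]
--     counts = [face[0] for face in off_faces]
--     faces = [sum(counts[:i]) for i in range(len(counts))]
--     return vertex_indices, faces
-- ===== Notes on version B (the rewrite author's own statement) =====
-- stated objective: alternative
-- what changed: Replaces the single stateful loop (running offset accumulator with nested append loop) by three independent comprehensions: a flatten of the tails, a list of declared counts, and offsets computed per-face as a prefix sum of the counts.
import Mathlib
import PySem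

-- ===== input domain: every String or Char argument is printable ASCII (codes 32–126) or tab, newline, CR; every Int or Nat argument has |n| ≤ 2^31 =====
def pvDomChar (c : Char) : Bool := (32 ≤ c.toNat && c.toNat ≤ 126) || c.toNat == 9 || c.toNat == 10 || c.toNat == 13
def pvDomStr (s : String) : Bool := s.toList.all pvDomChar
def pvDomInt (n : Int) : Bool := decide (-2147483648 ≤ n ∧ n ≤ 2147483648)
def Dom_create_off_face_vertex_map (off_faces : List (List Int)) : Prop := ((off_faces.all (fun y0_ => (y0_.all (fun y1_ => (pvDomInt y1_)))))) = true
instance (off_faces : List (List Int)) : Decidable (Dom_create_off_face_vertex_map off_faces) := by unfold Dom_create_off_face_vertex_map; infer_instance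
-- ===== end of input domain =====

-- B replaces the stateful accumulator loop by independent comprehensions (flatten + per-face prefix sums); alternative decomposition, same results.

-- ===== PORT A =====
-- state is (faces, vertex_indices, current_index); face[0] via pyGetD (in range under Pre_), face[1:] via slice
def create_off_face_vertex_map (off_faces : List (List Int)) : List Int × List Int :=
  let st := off_faces.foldl
    (fun (st : List Int × List Int × Int) face =>
      (st.1 ++ [st.2.2],
       st.2.1 ++ PySem.List.slice face (some 1) none,
       st.2.2 + PySem.List.pyGetD face 0 0))
    ([], [], 0)
  (st.2.1, st.1)

-- ===== PORT B =====
def create_off_face_vertex_map_alt (off_faces : List (List Int)) : List Int × List Int :=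
  let vertex_indices := off_faces.flatMap (fun face => PySem.List.slice face (some 1) none)
  let counts := off_faces.map (fun face => PySem.List.pyGetD face 0 0)
  let faces := (List.range counts.length).map (fun i => (counts.take i).sum)
  (vertex_indices, faces)

-- ===== PRECONDITION & SPEC =====
-- Pre_ excludes inputs containing an empty face row: there face[0] raises IndexError in A (and in B's counts comprehension alike).
def Pre_create_off_face_vertex_map (off_faces : List (List Int)) : Prop :=
  ∀ face ∈ off_faces, face ≠ []
instance (off_faces : List (List Int)) : Decidable (Pre_create_off_face_vertex_map off_faces) := by unfold Pre_create_off_face_vertex_map; infer_instance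

def pvWitness_create_off_face_vertex_map : List (List Int) := [[3, 0, 1, 2], [3, 2, 3, 0]]

def Spec_create_off_face_vertex_map (off_faces : List (List Int)) (out : List Int × List Int) : Prop := out = create_off_face_vertex_map_alt off_faces
instance (off_faces : List (List Int)) (out : List Int × List Int) : Decidable (Spec_create_off_face_vertex_map off_faces out) := by unfold Spec_create_off_face_vertex_map; infer_instance

-- ===== CLAIM (what is proved, stated in full; the proofs are below) =====
def Claim_equal_create_off_face_vertex_map : Prop := ∀ (off_faces : List (List Int)), Dom_create_off_face_vertex_map off_faces → Pre_create_off_face_vertex_map off_faces → Spec_create_off_face_vertex_map off_faces (create_off_face_vertex_map off_faces)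

-- ===== LEMMAS AND PROOFS =====
-- invariant for A's fold: from state (fs, vi, c) the fold produces the comprehension values shifted by c
theorem offvm_fold_inv (l : List (List Int)) (fs vi : List Int) (c : Int) :
    l.foldl
      (fun (st : List Int × List Int × Int) face =>
        (st.1 ++ [st.2.2],
         st.2.1 ++ PySem.List.slice face (some 1) none,
         st.2.2 + PySem.List.pyGetD face 0 0))
      (fs, vi, c)
    = (fs ++ (List.range l.length).map
          (fun i => c + ((l.map (fun face => PySem.List.pyGetD face 0 0)).take i).sum),
       vi ++ l.flatMap (fun face => PySem.List.slice face (some 1) none),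
       c + (l.map (fun face => PySem.List.pyGetD face 0 0)).sum) := by
  induction l generalizing fs vi c with
  | nil => simp
  | cons a t ih =>
      simp only [List.foldl_cons, ih, List.length_cons, List.map_cons, List.flatMap_cons,
        List.sum_cons, List.range_succ_eq_map, List.map_map, Prod.mk.injEq]
      refine ⟨?_, by simp, by ring⟩
      simp only [Function.comp_def, List.take_succ_cons, List.sum_cons, List.take_zero,
        List.sum_nil, add_zero]
      rw [List.append_assoc]
      simp only [List.singleton_append]
      exact congrArg (fun z => fs ++ c :: z) (List.map_congr_left fun i _ => by ring)

-- ===== VERDICT (by name: the statement is the Claim_ definition above) =====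
theorem create_off_face_vertex_map_spec : Claim_equal_create_off_face_vertex_map := by
  intro off_faces _ _
  unfold Spec_create_off_face_vertex_map create_off_face_vertex_map create_off_face_vertex_map_alt
  simp only [offvm_fold_inv, List.nil_append, List.length_map, zero_add]
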